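/-
  THE END THEOREM'S STATEMENT, for ANY program built on this platform (a `def … : Prop`; the theorem itself is the last thing a
  program's proof produces).

      NeverReports im         for every input of at most 1FF000H bytes, on every processor the proof covers, at ring 0 and at ring 3:
                              the run of `X86.run` from the start machine reaches `im.exit` (the HLT of the normal exit, not yet
                              executed), and the machine is at `im.report` (`__asan_report`) after none of the steps before
      StaysInCode im          the same, and moreover after every step before the last RIP is inside `[100000H, im.textEnd)`
      NeverReports.of_reachVia / StaysInCode.of_reachVia
                              the one use of the flat machine that an end theorem makes: a `ReachVia` from the start state to the
                              exit, through states that satisfy the invariant of the way, GIVES the statement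

  The statement mentions: `X86.run`, `User.decoder` (= `Dec.decoder μ (Dec.mkTable X86.allRows)`, the model's real decoder),
  `ProgX.start` (= `User.startMachine c (ProgX.file im inp) im.entry 800000H`, ProgX/Start.lean), the three addresses of the image,
  and `MicroOK`. Nothing else: no user state, no `wpUser`, no shadow predicate, no contract.

  THE PROOF OF A PROGRAM, ON ONE PAGE (ProgX/Top.lean has the generic part)
  0. Fix μ, c, inp. `L := startLayout c hc` (user region [100000H, 1000000H)). `I := WayInv T` (ProgX/Spec/Basic.lean).
  1. THE STUB `_start` is not a function: its "contract" is a `ReachVia L μ I (startU im c inp) (fun v => v.rip = im.exit)`, proved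
     by a walk of its instructions from `startU`: `call run_ctors` (contract `runCtorsSpec`), six 8-byte loads of the parameter
     block (`start_param`), `call prog_main` (THE theorem about the program: the tree of contracts of its functions), the stores
     of the results, rip = exit.
  2. `ReachVia.sound_rip (start_abs …)` turns it into the statement about `X86.run` (`of_reachVia` below).
  3. `#print axioms`: propext, Classical.choice, Quot.sound, and what X86/Derived/User/{Walk,MemPath}.lean already use.

  IS "RIP ≠ REPORT AFTER EVERY STEP" THE RIGHT FORMALISATION OF "THE SANITIZER NEVER FIRES"? Each check routine of c/base/asan_rt.c
  is compiled to: compute, compare, `ret` on success; on failure `… call __asan_report`. `X86.run` counts whole instructions, so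
  the state after that `call` has RIP = REPORT exactly: a fired check IS a state of the run at REPORT, and nothing else reaches
  REPORT. (1) The runtime reads a shadow byte only after the ceiling test, so a failed check cannot manifest as a fault inside the
  runtime; this is proved, not assumed (the runtime's code is walked like all other code). (2) The conjunct is implied by "reaches
  EXIT" (the code at REPORT halts for ever) and is stated for readability. (3) What the plain statement does not say is that no
  instruction FAULTED on the way; `StaysInCode` puts the visible part of that into the statement: RIP never leaves the text
  window, so control never went to a handler (the IDT of the start machine is zero memory). RECOMMENDED as the headline.
  NOTE ON `textEnd`: on the base-image platform (ProgX/Base) the text window is the FIXED range [100000H, 140000H) in every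
  program (code slots, 0xCC padding between and after them), so that the contracts and proofs of the base are closed terms.

  WHAT A READER MUST TRUST: the statement below and the definitions it unfolds to — the model's trusted base; `User.startMachine`;
  `ProgX.file` = `memByte` + `initShadow` + `paramWord` (ProgX/Start.lean; byte-identical to c/harness.py's memory file on the
  inputs tried: check/); the `Image` the theorem is instantiated with (its bytes are <prog>.bin; `imageEnd`, `entry`, `exit`,
  `report` are `__image_end`, `_start`, `prog_exit`, `__asan_report` of <prog>.sym); `MicroOK` (= `UserX.MicroOK`); Lean's kernel
  and the axioms `#print axioms` lists. NOT: X86/Derived/User, UserX, Asan, the rest of ProgX, the decode facts, the program's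
  invariants, the C source, gcc: they occur in no statement.
-/
import ProgX.Start
import UserX.ReachVia
import UserX.MicroOK
import X86.Derived.Sem.Coherent
namespace ProgX
open X86 X86.User

/-- **What the proof assumes of the processor**: it follows Intel's manual, its two answers to "whose manual" agree
(`Microarch.Coherent`; `Microarch.ofConfig`, what every interpreter runs with, satisfies it), and it enumerates SSE and SSE2
(libm and every floating-point program use SSE). This IS `UserX.MicroOK` (UserX/MicroOK.lean: the one hypothesis about `μ` that every
proof of the tree carries, from which the stepper derives `SseMicro μ` and `μ.vendor = .intel`); the interpreter's processor
meets it: `UserX.microOK_interp`. -/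
abbrev MicroOK (μ : Microarch) : Prop := UserX.MicroOK μ

/-- The end theorem is not vacuous in `μ`: the processor record every interpreter of the tree runs with is covered. -/
theorem microOK_interp : MicroOK (Microarch.ofConfig Interp.interpConfig) := UserX.microOK_interp

/-- The inputs the harness has room for: IN is [200000H, 3FF000H). -/
def Fits (inp : List UInt8) : Prop := inp.length ≤ 0x1FF000

/-- **The program never trips the address sanitizer.** For the image `im`: whatever the input, the run from the start machine
reaches the HLT of the normal exit (not yet executed), and after none of the steps before is the machine at `__asan_report`. -/
def NeverReports (im : Image) : Prop :=
  ∀ (μ : Microarch), MicroOK μ → ∀ (c : Nat), c = 0 ∨ c = 3 → ∀ (inp : List UInt8), Fits inp →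
    ∃ k m', X86.run (User.decoder μ) (start im c inp) k = .next m' ∧
      m'.rip = im.exit ∧
      ∀ j, j < k → ∀ mj, X86.run (User.decoder μ) (start im c inp) j = .next mj → mj.rip ≠ im.report

/-- RIP is inside the code of the image: `[100000H, __text_end)`. -/
def InText (im : Image) (rip : Word) : Prop := 0x100000 ≤ rip.toNat ∧ rip.toNat < im.textEnd

/-- **The stronger form**: moreover, after every step before the last, RIP is inside the image's code — control never left
the program (no exception was delivered to a handler). -/
def StaysInCode (im : Image) : Prop :=
  ∀ (μ : Microarch), MicroOK μ → ∀ (c : Nat), c = 0 ∨ c = 3 → ∀ (inp : List UInt8), Fits inp →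
    ∃ k m', X86.run (User.decoder μ) (start im c inp) k = .next m' ∧
      m'.rip = im.exit ∧
      ∀ j, j < k → ∀ mj, X86.run (User.decoder μ) (start im c inp) j = .next mj → mj.rip ≠ im.report ∧ InText im mj.rip

/-- The stronger form implies the plain one. -/
theorem StaysInCode.neverReports {im : Image} (h : StaysInCode im) : NeverReports im := by
  intro μ hμ c hc inp hfit
  obtain ⟨k, m', hrun, hexit, hvia⟩ := h μ hμ c hc inp hfit
  exact ⟨k, m', hrun, hexit, fun j hj mj hmj => (hvia j hj mj hmj).1⟩

/-- **From the flat machine to the statement.** What remains to be proved for `NeverReports im` is a `ReachVia` of the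
flat user machine: from the start state to a state at the exit, through states that are not at `__asan_report`. -/
theorem NeverReports.of_reachVia (im : Image)
    (h : ∀ (μ : Microarch), MicroOK μ → ∀ (c : Nat) (hc : c = 0 ∨ c = 3) (inp : List UInt8), Fits inp →
      ReachVia (startLayout c hc) μ (fun v => v.rip ≠ im.report) (startU im c inp) (fun v => v.rip = im.exit)) :
    NeverReports im := by
  intro μ hμ c hc inp hfit
  have hreach := h μ hμ c hc inp hfit
  obtain ⟨k, m', u', hrun, habs, hexit, _, hvia⟩ :=
    ReachVia.sound_rip (J := fun rip => rip ≠ im.report) (start_abs im c hc inp) hreach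
  exact ⟨k, m', hrun, habs.rip.trans hexit, hvia⟩

/-- The same for the stronger form: the invariant of the way is "not at `__asan_report`, and inside the code". -/
theorem StaysInCode.of_reachVia (im : Image)
    (h : ∀ (μ : Microarch), MicroOK μ → ∀ (c : Nat) (hc : c = 0 ∨ c = 3) (inp : List UInt8), Fits inp →
      ReachVia (startLayout c hc) μ (fun v => v.rip ≠ im.report ∧ InText im v.rip) (startU im c inp)
        (fun v => v.rip = im.exit)) :
    StaysInCode im := by
  intro μ hμ c hc inp hfit
  have hreach := h μ hμ c hc inp hfit
  obtain ⟨k, m', u', hrun, habs, hexit, _, hvia⟩ :=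
    ReachVia.sound_rip (J := fun rip => rip ≠ im.report ∧ InText im rip) (start_abs im c hc inp) hreach
  exact ⟨k, m', hrun, habs.rip.trans hexit, hvia⟩

end ProgX
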